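-- pv_equiv track=rewrite | github.com/venetagrigorova/speech-pathologist | SpeechTeach/speech-to-text/TemporalAnalysisLibrary_V3_2.py | silencesToSoundChunks
-- ===== SOURCE A (Python) =====
-- def silencesToSoundChunks(silence_timestamps, min_chunk_samples = 1000):
--
--     #assume sound clip starts and ends with a silence
--     i=0
--     chunk_list = []
--     current_sound = []
--
--     #go through timestamps and "flip" inside-out...sortof
--     for silence in silence_timestamps:
--         if i==0:
--             current_sound.append(silence[1])
--         else:
--             current_sound.append(silence[0])
--
--             #only include a chunk if it is large enough
--             if(current_sound[1] - current_sound[0] > min_chunk_samples):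
--                 chunk_list.append(current_sound)
--
--             current_sound = [silence[1]]
--         i+=1
--
--     return chunk_list
-- ===== SOURCE B (Python) =====
-- def silencesToSoundChunks(silence_timestamps, min_chunk_samples=1000):
--     # Stage 1: flatten the silence intervals into a flat boundary-sample list.
--     flat = [t for interval in silence_timestamps for t in interval]
--     # Stage 2: drop the clip's outer boundaries; what remains alternates
--     # (sound start, sound end, sound start, ...).
--     interior = flat[1:-1]
--     # Stage 3: consume the flat list two samples at a time.
--     chunks = []
--     while len(interior) >= 2:
--         x, y, interior = interior[0], interior[1], interior[2:]
--         if y - x > min_chunk_samples: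
--             chunks.append([x, y])
--     return chunks
-- ===== Notes on version B (the rewrite author's own statement) =====
-- stated objective: alternative
-- what changed: Replaces A's single stateful interval loop (index flag + current_sound accumulator) by three stages over a different data structure: flatten the intervals into a flat boundary-sample list, slice off the two outer boundaries, then destructure that flat list two samples at a time into chunks.
import Mathlib
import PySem

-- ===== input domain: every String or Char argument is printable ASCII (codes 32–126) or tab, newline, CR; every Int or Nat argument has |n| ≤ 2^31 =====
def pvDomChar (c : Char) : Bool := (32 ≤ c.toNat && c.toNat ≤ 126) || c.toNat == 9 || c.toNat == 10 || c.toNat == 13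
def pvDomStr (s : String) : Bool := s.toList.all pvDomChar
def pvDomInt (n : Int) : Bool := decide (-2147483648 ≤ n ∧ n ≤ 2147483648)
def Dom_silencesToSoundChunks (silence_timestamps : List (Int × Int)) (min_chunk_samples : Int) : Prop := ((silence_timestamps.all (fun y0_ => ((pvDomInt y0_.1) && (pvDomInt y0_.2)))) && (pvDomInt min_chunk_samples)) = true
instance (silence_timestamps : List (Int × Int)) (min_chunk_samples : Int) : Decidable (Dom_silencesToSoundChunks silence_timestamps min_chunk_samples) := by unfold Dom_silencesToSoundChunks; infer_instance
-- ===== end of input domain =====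

-- B replaces A's stateful interval loop by three stages: flatten the intervals into a
-- flat boundary-sample list, slice off the outer boundaries, consume it two at a time.

-- ===== PORT A =====
-- A's loop body; state is (i, chunk_list, current_sound), folded over the timestamps.
def silencesToSoundChunksStep (min_chunk_samples : Int)
    (s : Int × List (List Int) × List Int) (silence : Int × Int) :
    Int × List (List Int) × List Int :=
  let (i, chunk_list, current_sound) := s
  if i == 0 then
    (i + 1, chunk_list, current_sound ++ [silence.2])
  else
    let current_sound := current_sound ++ [silence.1]
    let chunk_list :=
      if (current_sound.getD 1 0) - (current_sound.getD 0 0) > min_chunk_samples then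
        chunk_list ++ [current_sound]
      else chunk_list
    (i + 1, chunk_list, [silence.2])

def silencesToSoundChunks (silence_timestamps : List (Int × Int)) (min_chunk_samples : Int) : List (List Int) :=
  (silence_timestamps.foldl (silencesToSoundChunksStep min_chunk_samples) (0, [], [])).2.1

-- ===== PORT B =====
-- the while loop of Source B: peel two samples off the front of `interior` per iteration
def silencesToSoundChunksPairLoop (min_chunk_samples : Int)
    (chunks : List (List Int)) : List Int → List (List Int)
  | x :: y :: rest =>
      silencesToSoundChunksPairLoop min_chunk_samples
        (if y - x > min_chunk_samples then chunks ++ [[x, y]] else chunks) rest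
  | _ => chunks

def silencesToSoundChunks_alt (silence_timestamps : List (Int × Int)) (min_chunk_samples : Int) : List (List Int) :=
  let flat := silence_timestamps.flatMap (fun interval => [interval.1, interval.2])
  let interior := PySem.List.slice flat (some 1) (some (-1))   -- flat[1:-1]
  silencesToSoundChunksPairLoop min_chunk_samples [] interior

-- ===== PRECONDITION & SPEC =====
def Spec_silencesToSoundChunks (silence_timestamps : List (Int × Int)) (min_chunk_samples : Int) (out : List (List Int)) : Prop := out = silencesToSoundChunks_alt silence_timestamps min_chunk_samples
instance (silence_timestamps : List (Int × Int)) (min_chunk_samples : Int) (out : List (List Int)) : Decidable (Spec_silencesToSoundChunks silence_timestamps min_chunk_samples out) := by unfold Spec_silencesToSoundChunks; infer_instance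

-- ===== CLAIM =====
def Claim_equal_silencesToSoundChunks : Prop := ∀ (silence_timestamps : List (Int × Int)) (min_chunk_samples : Int), Dom_silencesToSoundChunks silence_timestamps min_chunk_samples → Spec_silencesToSoundChunks silence_timestamps min_chunk_samples (silencesToSoundChunks silence_timestamps min_chunk_samples)

-- ===== LEMMAS AND PROOFS =====

-- Reference form: chunks contributed by the tail l when the previous silence ended at x.
def chunksFrom (m x : Int) : List (Int × Int) → List (List Int)
  | [] => []
  | b :: t => (if b.1 - x > m then [[x, b.1]] else []) ++ chunksFrom m b.2 t

-- the interior boundary list of x :: t, i.e. x, then both endpoints of each of t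
-- except the very last one
def interiorOf (x : Int) : List (Int × Int) → List Int
  | [] => []
  | b :: t => x :: b.1 :: interiorOf b.2 t

-- A's loop, after the first iteration, computes chunksFrom.
theorem loopA_eq_chunksFrom (m : Int) :
    ∀ (l : List (Int × Int)) (i : Int) (cl : List (List Int)) (x : Int), 0 < i →
    (l.foldl (silencesToSoundChunksStep m) (i, cl, [x])).2.1 = cl ++ chunksFrom m x l := by
  intro l
  induction l with
  | nil => intro i cl x _; simp [chunksFrom]
  | cons b t ih =>
    intro i cl x hi
    have hib : (i == 0) = false := by simp; omega
    simp only [List.foldl_cons, silencesToSoundChunksStep, hib, Bool.false_eq_true, if_false,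
      List.cons_append, List.nil_append, List.getD, List.getElem?_cons_succ,
      List.getElem?_cons_zero, Option.getD_some]
    rw [ih (i + 1) _ b.2 (by omega), chunksFrom]
    by_cases h : b.1 - x > m <;> simp [h]

-- flat[1:-1] in Lean terms
theorem slice_1_neg1 (xs : List Int) :
    PySem.List.slice xs (some 1) (some (-1)) = xs.tail.dropLast := by
  unfold PySem.List.slice
  simp
  cases xs with
  | nil => simp
  | cons a t => simp [List.dropLast_eq_take]

-- slicing the outer boundaries off the flattened intervals gives interiorOf
theorem interior_eq (x : Int) :
    ∀ (t : List (Int × Int)),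
    (x :: t.flatMap (fun interval => [interval.1, interval.2])).dropLast = interiorOf x t := by
  intro t
  induction t generalizing x with
  | nil => simp [interiorOf]
  | cons b t2 ih =>
    have h2 := ih b.2
    simp only [List.flatMap_cons, interiorOf] at *
    cases h : (b.2 :: t2.flatMap (fun interval => [interval.1, interval.2])) with
    | nil => simp at h
    | cons z zs => simp [h2]

-- B's pair-consuming loop computes chunksFrom on interiorOf.
theorem loopB_eq_chunksFrom (m : Int) :
    ∀ (t : List (Int × Int)) (cl : List (List Int)) (x : Int),
    silencesToSoundChunksPairLoop m cl (interiorOf x t) = cl ++ chunksFrom m x t := by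
  intro t
  induction t with
  | nil => intro cl x; simp [interiorOf, chunksFrom, silencesToSoundChunksPairLoop]
  | cons b t2 ih =>
    intro cl x
    rw [interiorOf, silencesToSoundChunksPairLoop, ih, chunksFrom]
    by_cases h : b.1 - x > m <;> simp [h]

-- ===== VERDICT =====
theorem silencesToSoundChunks_spec : Claim_equal_silencesToSoundChunks := by
  intro sts m _
  unfold Spec_silencesToSoundChunks silencesToSoundChunks silencesToSoundChunks_alt
  cases sts with
  | nil => rfl
  | cons a t =>
    simp only [List.foldl_cons, silencesToSoundChunksStep, beq_self_eq_true, if_true,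
      List.nil_append, List.flatMap_cons]
    rw [loopA_eq_chunksFrom m t (0+1) [] a.2 (by omega), slice_1_neg1]
    simp only [List.cons_append, List.tail_cons, List.nil_append]
    rw [interior_eq, loopB_eq_chunksFrom]
    simp
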